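-- pv_equiv track=rewrite | github.com/PythonCoder8/codewars | python/Find the Unique String - 5 kyu.py | find_uniq
-- ===== SOURCE A (Python) =====
-- def find_uniq(arr):
--     char_map = {}
--
--     for string in arr:
--         char_set = frozenset(string.lower())
--         if char_set in char_map:
--             char_map[char_set].append(string)
--         else:
--             char_map[char_set] = [string]
--
--     for key, value in char_map.items():
--         if len(value) == 1:
--             return value[0]
-- ===== SOURCE B (Python) =====
-- def find_uniq(arr):
--     # Return the first string whose lowercased character set is held by
--     # exactly one element of arr; fall through (None) if there is none.
--     for s in arr:
--         cs = set(s.lower())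
--         if sum(1 for t in arr if set(t.lower()) == cs) == 1:
--             return s
-- ===== Notes on version B (the rewrite author's own statement) =====
-- stated objective: alternative
-- what changed: B drops A's build-a-grouping-dict-then-scan approach entirely: it walks arr in order and returns the first string whose lowercased character set, counted by rescanning the whole array, is shared by exactly one element.
-- outside the precondition, e.g. on find_uniq(['a', 'a']): A returns None, B returns None
import Mathlib
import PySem

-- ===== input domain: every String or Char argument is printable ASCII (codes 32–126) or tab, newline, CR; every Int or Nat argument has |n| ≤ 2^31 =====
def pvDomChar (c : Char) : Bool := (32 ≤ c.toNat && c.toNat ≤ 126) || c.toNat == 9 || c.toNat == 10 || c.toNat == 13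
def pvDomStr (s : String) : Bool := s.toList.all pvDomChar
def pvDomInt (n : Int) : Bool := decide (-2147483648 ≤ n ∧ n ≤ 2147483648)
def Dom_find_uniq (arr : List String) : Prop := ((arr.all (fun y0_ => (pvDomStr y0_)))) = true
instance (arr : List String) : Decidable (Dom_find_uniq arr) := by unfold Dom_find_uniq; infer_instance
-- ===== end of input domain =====

-- B replaces A's grouping-dict-then-scan by a direct first-string-whose-charset-count-is-1 rescan
-- (alternative decomposition, same result; not faster).


-- ===== PORT A =====
-- shared helpers: frozenset(string.lower()) and frozenset equality.
-- Python frozenset equality is element equality; `pvSeteq` implements exactly that,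
-- so an association list looked up with `pvSeteq` is an exact port of A's dict keyed
-- by frozensets (insertion order = .items() order).
def pvSeteq (a b : List Char) : Bool :=
  (a.all (fun c => b.contains c)) && (b.all (fun c => a.contains c))

def pvLow (s : String) : List Char := PySem.Set.ofList (PySem.Str.lower s).toList

def pvHasKey (m : List (List Char × List String)) (k : List Char) : Bool :=
  m.any (fun p => pvSeteq k p.1)

-- char_map[char_set].append(string): extend the (unique) matching entry in place
def pvAddToGroup (m : List (List Char × List String)) (k : List Char) (s : String) :
    List (List Char × List String) :=
  match m with
  | [] => []
  | (k', v) :: rest =>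
      if pvSeteq k k' then (k', v ++ [s]) :: rest else (k', v) :: pvAddToGroup rest k s

-- first loop of A
def pvBuildMap (m : List (List Char × List String)) : List String → List (List Char × List String)
  | [] => m
  | s :: rest =>
      let k := pvLow s
      if pvHasKey m k then pvBuildMap (pvAddToGroup m k s) rest
      else pvBuildMap (m ++ [(k, [s])]) rest

-- second loop of A (Python returns None when it falls through; excluded by Pre_find_uniq)
def pvFirstUniqGroup : List (List Char × List String) → String
  | [] => ""
  | (_, v) :: rest => if v.length = 1 then v.headD "" else pvFirstUniqGroup rest

def find_uniq (arr : List String) : String := pvFirstUniqGroup (pvBuildMap [] arr)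

-- ===== PORT B =====
-- for s in arr: return s if exactly one t in arr has set(t.lower()) == set(s.lower())
-- (Python returns None when the loop falls through; excluded by Pre_find_uniq)
def pvBLoop (arr : List String) : List String → String
  | [] => ""
  | s :: rest =>
      if (arr.filter (fun t => pvSeteq (pvLow t) (pvLow s))).length = 1 then s
      else pvBLoop arr rest

def find_uniq_alt (arr : List String) : String := pvBLoop arr arr

-- ===== PRECONDITION & SPEC =====
-- Pre_ excludes exactly the arrays holding no string with a unique lowercased character
-- set: there both Pythons fall off the end and return None, which is not a str.
def Pre_find_uniq (arr : List String) : Prop :=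
  ∃ s ∈ arr, (arr.filter (fun t => pvSeteq (pvLow t) (pvLow s))).length = 1
instance (arr : List String) : Decidable (Pre_find_uniq arr) := by
  unfold Pre_find_uniq; infer_instance

def pvWitness_find_uniq : List String := ["a", "b", "b"]

def Spec_find_uniq (arr : List String) (out : String) : Prop := out = find_uniq_alt arr
instance (arr : List String) (out : String) : Decidable (Spec_find_uniq arr out) := by
  unfold Spec_find_uniq; infer_instance

-- ===== CLAIM (what is proved, stated in full; the proofs are below) =====
def Claim_equal_find_uniq : Prop :=
  ∀ (arr : List String), Dom_find_uniq arr → Pre_find_uniq arr →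
    Spec_find_uniq arr (find_uniq arr)

-- ===== LEMMAS AND PROOFS =====

lemma pvSeteq_iff (a b : List Char) : pvSeteq a b = true ↔ (∀ c, c ∈ a ↔ c ∈ b) := by
  simp only [pvSeteq, Bool.and_eq_true, List.all_eq_true, List.contains_iff_mem]
  constructor
  · rintro ⟨h1, h2⟩ c; exact ⟨fun hc => h1 c hc, fun hc => h2 c hc⟩
  · intro h; exact ⟨fun c hc => (h c).1 hc, fun c hc => (h c).2 hc⟩

lemma pvSeteq_refl (a : List Char) : pvSeteq a a = true := by
  rw [pvSeteq_iff]; intro c; rfl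

lemma pvSeteq_symm (a b : List Char) : pvSeteq a b = pvSeteq b a := by
  simp only [pvSeteq]; rw [Bool.and_comm]

lemma pvSeteq_trans {a b c : List Char} (h1 : pvSeteq a b = true) (h2 : pvSeteq b c = true) :
    pvSeteq a c = true := by
  rw [pvSeteq_iff] at h1 h2 ⊢
  intro x; exact (h1 x).trans (h2 x)

lemma pvSeteq_congr_right {k1 k2 : List Char} (h : pvSeteq k1 k2 = true) (x : List Char) :
    pvSeteq x k1 = pvSeteq x k2 := by
  cases h1 : pvSeteq x k1
  · cases h2 : pvSeteq x k2
    · rfl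
    · exact absurd (pvSeteq_trans h2 ((pvSeteq_symm k2 k1).trans h)) (by simp [h1])
  · exact (pvSeteq_trans h1 h).symm

-- pairwise-distinct keys of the association list (A's dict invariant)
def pvPK (m : List (List Char × List String)) : Prop :=
  List.Pairwise (fun a b => pvSeteq a b = false) (m.map Prod.fst)

lemma pvAddToGroup_keys (m : List (List Char × List String)) (k : List Char) (s : String) :
    (pvAddToGroup m k s).map Prod.fst = m.map Prod.fst := by
  induction m with
  | nil => rfl
  | cons p rest ih =>
      obtain ⟨k', v⟩ := p
      simp only [pvAddToGroup]
      split <;> simp [ih]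

lemma pvHasKey_addToGroup (m : List (List Char × List String)) (k s k') :
    pvHasKey (pvAddToGroup m k s) k' = pvHasKey m k' := by
  induction m with
  | nil => rfl
  | cons p rest ih =>
      obtain ⟨k2, v⟩ := p
      simp only [pvAddToGroup]
      split <;> simp_all [pvHasKey]

lemma pvPK_addToGroup {m : List (List Char × List String)} (h : pvPK m) (k s) :
    pvPK (pvAddToGroup m k s) := by
  unfold pvPK; rw [pvAddToGroup_keys]; exact h

lemma pvAddToGroup_eq {m : List (List Char × List String)} (h : pvPK m) (k s) :
    pvAddToGroup m k s = m.map (fun p => if pvSeteq k p.1 then (p.1, p.2 ++ [s]) else p) := by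
  induction m with
  | nil => rfl
  | cons p rest ih =>
      obtain ⟨k', v⟩ := p
      simp only [pvPK, List.map_cons, List.pairwise_cons] at h
      obtain ⟨hhd, htl⟩ := h
      simp only [pvAddToGroup, List.map_cons]
      by_cases hk : pvSeteq k k' = true
      · simp only [hk, if_pos]
        congr 1
        have : ∀ q ∈ rest, (if pvSeteq k q.1 then (q.1, q.2 ++ [s]) else q) = q := by
          intro q hq
          have : pvSeteq k q.1 = false := by
            cases hkq : pvSeteq k q.1
            · rfl
            · have := pvSeteq_trans (by rw [pvSeteq_symm]; exact hk) hkq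
              have := hhd q.1 (List.mem_map_of_mem hq)
              simp_all
          simp [this]
        rw [List.map_congr_left this]; simp
      · simp only [hk]
        simp only [Bool.not_eq_true] at hk
        rw [if_neg (by simp)]
        exact congrArg _ (ih htl)

lemma pvHasKey_append (m1 m2 : List (List Char × List String)) (k : List Char) :
    pvHasKey (m1 ++ m2) k = (pvHasKey m1 k || pvHasKey m2 k) := by
  simp [pvHasKey]

-- the engine: processing `rest` on top of a well-formed accumulator `m` extends each
-- entry of `m` with its matching strings and appends the groups of the fresh keys
lemma pvBuildMap_merge : ∀ (n : Nat) (rest : List String), rest.length ≤ n →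
    ∀ m, pvPK m →
    pvBuildMap m rest =
      m.map (fun p => (p.1, p.2 ++ rest.filter (fun t => pvSeteq (pvLow t) p.1))) ++
      pvBuildMap [] (rest.filter (fun t => !pvHasKey m (pvLow t))) := by
  intro n
  induction n with
  | zero =>
      intro rest hlen m _
      have : rest = [] := List.eq_nil_of_length_eq_zero (Nat.le_zero.mp hlen)
      subst this; simp [pvBuildMap]
  | succ n ih =>
      intro rest hlen m hm
      match rest with
      | [] => simp [pvBuildMap]
      | s :: rs =>
        simp only [List.length_cons, Nat.add_le_add_iff_right] at hlen
        by_cases h : pvHasKey m (pvLow s) = true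
        · have step : pvBuildMap m (s :: rs) = pvBuildMap (pvAddToGroup m (pvLow s) s) rs := by
            simp [pvBuildMap, h]
          rw [step, ih rs hlen _ (pvPK_addToGroup hm (pvLow s) s)]
          congr 1
          · rw [pvAddToGroup_eq hm, List.map_map]
            apply List.map_congr_left
            intro p hp
            by_cases hps : pvSeteq (pvLow s) p.1 = true
            · simp [Function.comp, hps, List.append_assoc]
            · simp only [Bool.not_eq_true] at hps
              simp [Function.comp, hps]
          · have hfun : (fun t => !pvHasKey (pvAddToGroup m (pvLow s) s) (pvLow t)) =
                (fun t => !pvHasKey m (pvLow t)) := by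
              funext t; rw [pvHasKey_addToGroup]
            rw [hfun]
            have hcf : (s :: rs).filter (fun t => !pvHasKey m (pvLow t)) =
                rs.filter (fun t => !pvHasKey m (pvLow t)) := by
              simp [h]
            rw [hcf]
        · simp only [Bool.not_eq_true] at h
          have step : pvBuildMap m (s :: rs) = pvBuildMap (m ++ [(pvLow s, [s])]) rs := by
            simp [pvBuildMap, h]
          have hall : ∀ p ∈ m, pvSeteq (pvLow s) p.1 = false := by
            intro p hp
            by_contra hc
            simp only [Bool.not_eq_false] at hc
            have : pvHasKey m (pvLow s) = true := by
              simp only [pvHasKey, List.any_eq_true]; exact ⟨p, hp, hc⟩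
            simp [this] at h
          have hpk' : pvPK (m ++ [(pvLow s, [s])]) := by
            unfold pvPK
            rw [List.map_append, List.pairwise_append]
            refine ⟨hm, by simp, ?_⟩
            intro a ha b hb
            simp only [List.map_cons, List.map_nil, List.mem_singleton] at hb
            subst hb
            obtain ⟨p, hp, rfl⟩ := List.mem_map.mp ha
            rw [pvSeteq_symm]; exact hall p hp
          rw [step, ih rs hlen _ hpk', List.map_append]
          have hXlen : (rs.filter (fun t => !pvHasKey m (pvLow t))).length ≤ n :=
            le_trans (List.length_filter_le _ _) hlen
          have inner : pvBuildMap [] ((s :: rs).filter (fun t => !pvHasKey m (pvLow t))) =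
              [(pvLow s, [s] ++ (rs.filter (fun t => !pvHasKey m (pvLow t))).filter
                  (fun t => pvSeteq (pvLow t) (pvLow s)))] ++
              pvBuildMap [] ((rs.filter (fun t => !pvHasKey m (pvLow t))).filter
                  (fun t => !pvHasKey [(pvLow s, [s])] (pvLow t))) := by
            have : (s :: rs).filter (fun t => !pvHasKey m (pvLow t)) =
                s :: rs.filter (fun t => !pvHasKey m (pvLow t)) := by
              simp [h]
            rw [this]
            have step0 : pvBuildMap [] (s :: rs.filter (fun t => !pvHasKey m (pvLow t))) =
                pvBuildMap [(pvLow s, [s])] (rs.filter (fun t => !pvHasKey m (pvLow t))) := by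
              simp [pvBuildMap, pvHasKey]
            rw [step0, ih _ hXlen [(pvLow s, [s])] (by unfold pvPK; simp)]
            simp
          rw [inner]
          -- rewrite the two double filters
          have f1 : (rs.filter (fun t => !pvHasKey m (pvLow t))).filter
              (fun t => pvSeteq (pvLow t) (pvLow s)) =
              rs.filter (fun t => pvSeteq (pvLow t) (pvLow s)) := by
            rw [List.filter_filter]
            apply List.filter_congr
            intro t _
            cases hts : pvSeteq (pvLow t) (pvLow s)
            · simp
            · have : pvHasKey m (pvLow t) = false := by
                by_contra hc
                simp only [Bool.not_eq_false, pvHasKey, List.any_eq_true] at hc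
                obtain ⟨p, hp, hpt⟩ := hc
                have := pvSeteq_trans (a := pvLow s) (by rw [pvSeteq_symm]; exact hts) hpt
                rw [hall p hp] at this; exact Bool.false_ne_true this
              simp [this]
          have f2 : (rs.filter (fun t => !pvHasKey m (pvLow t))).filter
              (fun t => !pvHasKey [(pvLow s, [s])] (pvLow t)) =
              rs.filter (fun t => !pvHasKey (m ++ [(pvLow s, [s])]) (pvLow t)) := by
            rw [List.filter_filter]
            apply List.filter_congr
            intro t _
            rw [pvHasKey_append]
            cases pvHasKey m (pvLow t) <;> cases pvHasKey [(pvLow s, [s])] (pvLow t) <;> rfl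
          rw [f1, f2]
          have f3 : m.map (fun p => (p.1, p.2 ++ rs.filter (fun t => pvSeteq (pvLow t) p.1))) =
              m.map (fun p => (p.1, p.2 ++ (s :: rs).filter (fun t => pvSeteq (pvLow t) p.1))) := by
            apply List.map_congr_left
            intro p hp
            simp [hall p hp]
          rw [f3, List.append_assoc]
          rfl

-- one-step unfolding of A's grouping on the full list
lemma pvBuildMap_cons (s : String) (rs : List String) :
    pvBuildMap [] (s :: rs) =
      (pvLow s, s :: rs.filter (fun t => pvSeteq (pvLow t) (pvLow s))) ::
      pvBuildMap [] (rs.filter (fun t => !pvSeteq (pvLow t) (pvLow s))) := by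
  have step : pvBuildMap [] (s :: rs) = pvBuildMap [(pvLow s, [s])] rs := by
    simp [pvBuildMap, pvHasKey]
  rw [step, pvBuildMap_merge rs.length rs le_rfl [(pvLow s, [s])] (by unfold pvPK; simp)]
  have : (fun t => !pvHasKey [(pvLow s, [s])] (pvLow t)) =
      (fun t => !pvSeteq (pvLow t) (pvLow s)) := by
    funext t; simp [pvHasKey]
  simp [this]

-- B's loop skips elements whose count is not 1, so filtering them away changes nothing
lemma pvBLoop_filter (arr : List String) (p : String → Bool) :
    ∀ l : List String,
      (∀ t ∈ l, p t = false →
        (arr.filter (fun u => pvSeteq (pvLow u) (pvLow t))).length ≠ 1) →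
      pvBLoop arr l = pvBLoop arr (l.filter p) := by
  intro l
  induction l with
  | nil => intro _; rfl
  | cons t ts ih =>
      intro h
      cases hp : p t
      · have h1 : (arr.filter (fun u => pvSeteq (pvLow u) (pvLow t))).length ≠ 1 :=
          h t (List.mem_cons_self) hp
        simp only [pvBLoop, List.filter_cons, hp, if_neg h1, Bool.false_eq_true, if_false]
        exact ih (fun u hu => h u (List.mem_cons_of_mem t hu))
      · simp only [pvBLoop, List.filter_cons, hp, if_true]
        cases hc : decide ((arr.filter (fun u => pvSeteq (pvLow u) (pvLow t))).length = 1)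
        · simp only [decide_eq_false_iff_not] at hc
          simp only [if_neg hc]
          exact ih (fun u hu => h u (List.mem_cons_of_mem t hu))
        · simp only [decide_eq_true_eq] at hc
          simp [hc]

-- the main correspondence: A's scan over the grouped table equals B's rescan loop,
-- for any sub-multiset l of arr that is closed under char-set classes
lemma pvMain : ∀ (n : Nat) (l : List String), l.length ≤ n → ∀ arr : List String,
    (∀ t ∈ l, (l.filter (fun u => pvSeteq (pvLow u) (pvLow t))).length =
              (arr.filter (fun u => pvSeteq (pvLow u) (pvLow t))).length) →
    pvFirstUniqGroup (pvBuildMap [] l) = pvBLoop arr l := by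
  intro n
  induction n with
  | zero =>
      intro l hlen arr _
      have : l = [] := List.eq_nil_of_length_eq_zero (Nat.le_zero.mp hlen)
      subst this; rfl
  | succ n ih =>
      intro l hlen arr hinv
      match l with
      | [] => rfl
      | s :: rs =>
        simp only [List.length_cons, Nat.add_le_add_iff_right] at hlen
        rw [pvBuildMap_cons]
        have hgrp : (s :: rs.filter (fun t => pvSeteq (pvLow t) (pvLow s))).length =
            (arr.filter (fun u => pvSeteq (pvLow u) (pvLow s))).length := by
          have := hinv s (List.mem_cons_self)
          rwa [List.filter_cons, if_pos (by simp [pvSeteq_refl])] at this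
        by_cases hc : (arr.filter (fun u => pvSeteq (pvLow u) (pvLow s))).length = 1
        · simp [pvFirstUniqGroup, pvBLoop, hgrp, hc]
        · have hne : (s :: rs.filter (fun t => pvSeteq (pvLow t) (pvLow s))).length ≠ 1 := by
            rw [hgrp]; exact hc
          simp only [pvFirstUniqGroup, if_neg hne, pvBLoop, if_neg hc]
          have hskip : pvBLoop arr rs =
              pvBLoop arr (rs.filter (fun t => !pvSeteq (pvLow t) (pvLow s))) := by
            apply pvBLoop_filter
            intro t ht hpt
            have hpt' : pvSeteq (pvLow t) (pvLow s) = true := by simpa using hpt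
            have hfun : (fun u => pvSeteq (pvLow u) (pvLow t)) =
                (fun u => pvSeteq (pvLow u) (pvLow s)) :=
              funext fun u => pvSeteq_congr_right hpt' (pvLow u)
            rw [hfun]; exact hc
          rw [hskip]
          apply ih (rs.filter (fun t => !pvSeteq (pvLow t) (pvLow s)))
            (le_trans (List.length_filter_le _ _) hlen) arr
          intro t ht
          have htrs : t ∈ rs := List.mem_of_mem_filter ht
          have hts : pvSeteq (pvLow t) (pvLow s) = false := by
            have := List.of_mem_filter ht
            simpa using this
          have e1 : (rs.filter (fun t => !pvSeteq (pvLow t) (pvLow s))).filter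
                (fun u => pvSeteq (pvLow u) (pvLow t)) =
              rs.filter (fun u => pvSeteq (pvLow u) (pvLow t)) := by
            rw [List.filter_filter]
            apply List.filter_congr
            intro u _
            cases hut : pvSeteq (pvLow u) (pvLow t)
            · simp
            · have hus : pvSeteq (pvLow u) (pvLow s) = false := by
                cases husb : pvSeteq (pvLow u) (pvLow s)
                · rfl
                · have := pvSeteq_trans (by rw [pvSeteq_symm]; exact hut) husb
                  rw [hts] at this; exact absurd this (Bool.false_ne_true)
              simp [hus]
          have e2 : ((s :: rs).filter (fun u => pvSeteq (pvLow u) (pvLow t))).length =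
              (rs.filter (fun u => pvSeteq (pvLow u) (pvLow t))).length := by
            rw [List.filter_cons, if_neg (by rw [pvSeteq_symm, hts]; simp)]
          have := hinv t (List.mem_cons_of_mem s htrs)
          rw [e1, ← this, e2]

-- ===== VERDICT (by name: the statement is the Claim_ definition above) =====
theorem find_uniq_spec : Claim_equal_find_uniq := by
  intro arr _ _
  unfold Spec_find_uniq find_uniq find_uniq_alt
  exact pvMain arr.length arr le_rfl arr (fun _ _ => rfl)
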